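-- pv_equiv track=rewrite | github.com/tylermann/aoc_2022 | nine.py | calculate_visited
-- ===== SOURCE A (Python) =====
-- def traverse(directions):
--     """
--     Traverse the directions given and yield the coordinates.
--     """
--     x, y = 0, 0
--     yield x, y
--
--     for direction, distance in directions:
--         if direction == 'R':
--             for _ in range(distance):
--                 x += 1
--                 yield x, y
--         elif direction == 'L':
--             for _ in range(distance):
--                 x -= 1
--                 yield x, y
--         elif direction == 'U':
--             for _ in range(distance):
--                 y += 1
--                 yield x, y
--         elif direction == 'D':
--             for _ in range(distance):
--                 y -= 1
--                 yield x, y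
--         else:
--             raise ValueError('Invalid direction')
--
-- def move_in_direction(c, desired_c):
--     return 1 if c < desired_c else -1
--
-- def calculate_visited(directions):
--     """
--     Calculate set of visited coordinates by the tail.
--     """
--     x, y = 0, 0
--     visited = {(0, 0)}
--     for head_x, head_y in traverse(directions):
--         # if we are directly adjacent, then we won't move
--         if abs(x - head_x) <= 1 and abs(y - head_y) <= 1:
--             continue
--
--         if x != head_x:
--             x += move_in_direction(x, head_x)
--         if y != head_y:
--             y += move_in_direction(y, head_y)
--
--         visited.add((x, y))
--     return visited
-- ===== SOURCE B (Python) =====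
-- def calculate_visited(directions):
--     """
--     Calculate set of visited coordinates by the tail.
--
--     The head only ever moves one orthogonal unit at a time, so whenever the
--     tail is left more than one square behind it lands exactly on the square
--     the head just vacated: track the head's previous position and teleport
--     the tail there, instead of recomputing per-axis sign moves.
--     """
--     moves = {'R': (1, 0), 'L': (-1, 0), 'U': (0, 1), 'D': (0, -1)}
--     hx, hy = 0, 0
--     tail = (0, 0)
--     visited = {tail}
--     for direction, distance in directions:
--         if direction not in moves:
--             raise ValueError('Invalid direction')
--         dx, dy = moves[direction]
--         for _ in range(distance):
--             prev = (hx, hy)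
--             hx += dx
--             hy += dy
--             if abs(hx - tail[0]) > 1 or abs(hy - tail[1]) > 1:
--                 tail = prev
--                 visited.add(tail)
--     return visited
-- ===== Notes on version B (the rewrite author's own statement) =====
-- stated objective: alternative
-- what changed: B drops the traverse generator and the per-axis sign-move tail rule entirely: it simulates head and tail in one loop and, using the fact that the head moves one orthogonal unit at a time, teleports the tail to the head's previous position whenever it lags by more than one square.
import Mathlib
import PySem

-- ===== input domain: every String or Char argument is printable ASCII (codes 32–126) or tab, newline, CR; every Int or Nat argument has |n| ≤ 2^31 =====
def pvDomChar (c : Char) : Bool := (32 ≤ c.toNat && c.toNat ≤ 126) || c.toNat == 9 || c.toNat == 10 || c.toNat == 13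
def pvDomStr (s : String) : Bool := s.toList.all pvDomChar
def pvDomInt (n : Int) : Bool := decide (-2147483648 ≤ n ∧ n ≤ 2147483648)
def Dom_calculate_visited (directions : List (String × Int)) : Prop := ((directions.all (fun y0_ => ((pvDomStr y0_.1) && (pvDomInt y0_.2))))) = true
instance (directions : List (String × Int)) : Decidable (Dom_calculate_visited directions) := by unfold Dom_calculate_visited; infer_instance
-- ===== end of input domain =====

-- B replaces A's traverse-generator + per-axis sign-move tail rule by a single loop
-- that teleports the lagging tail to the head's previous square (valid because the
-- head moves one orthogonal unit at a time). Equal return values on Pre_ (A raises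
-- ValueError outside it).

-- ===== PORT A =====
def move_in_direction (c desired_c : Int) : Int := if c < desired_c then 1 else -1

-- one `for _ in range(distance)` loop of `traverse`: yields positions, returns final head
def travSeg (dx dy x y : Int) : Nat → List (Int × Int) × Int × Int
  | 0 => ([], x, y)
  | Nat.succ n =>
    let r := travSeg dx dy (x + dx) (y + dy) n
    ((x + dx, y + dy) :: r.1, r.2)

-- the generator's direction loop; none = ValueError('Invalid direction')
def travGo : List (String × Int) → Int → Int → Option (List (Int × Int))
  | [], _, _ => some []
  | (d, dist) :: rest, x, y =>
    if d = "R" then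
      let s := travSeg 1 0 x y dist.toNat
      (travGo rest s.2.1 s.2.2).map (fun l => s.1 ++ l)
    else if d = "L" then
      let s := travSeg (-1) 0 x y dist.toNat
      (travGo rest s.2.1 s.2.2).map (fun l => s.1 ++ l)
    else if d = "U" then
      let s := travSeg 0 1 x y dist.toNat
      (travGo rest s.2.1 s.2.2).map (fun l => s.1 ++ l)
    else if d = "D" then
      let s := travSeg 0 (-1) x y dist.toNat
      (travGo rest s.2.1 s.2.2).map (fun l => s.1 ++ l)
    else none

def traverse (directions : List (String × Int)) : Option (List (Int × Int)) :=
  (travGo directions 0 0).map (fun l => ((0 : Int), (0 : Int)) :: l)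

-- body of A's `for head_x, head_y in traverse(...)` loop, state = (x, y, visited)
def tailStep (st : Int × Int × PySem.Set (Int × Int)) (h : Int × Int) :
    Int × Int × PySem.Set (Int × Int) :=
  if |st.1 - h.1| ≤ 1 ∧ |st.2.1 - h.2| ≤ 1 then st
  else
    let x' := if st.1 ≠ h.1 then st.1 + move_in_direction st.1 h.1 else st.1
    let y' := if st.2.1 ≠ h.2 then st.2.1 + move_in_direction st.2.1 h.2 else st.2.1
    (x', y', PySem.Set.add st.2.2 (x', y'))

def calculate_visited (directions : List (String × Int)) : List (Int × Int) :=
  match traverse directions with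
  | none => []   -- Python raises ValueError here; excluded by Pre_
  | some l => (l.foldl tailStep (0, 0, PySem.Set.ofList [((0 : Int), (0 : Int))])).2.2

-- ===== PORT B =====
def moves : PySem.Dict String (Int × Int) :=
  PySem.Dict.ofList [("R", ((1 : Int), (0 : Int))), ("L", (-1, 0)), ("U", (0, 1)), ("D", (0, -1))]

-- B's inner `for _ in range(distance)`: state = (hx, hy, tailx, taily, visited)
def bSeg (dx dy : Int) : Nat → Int × Int × Int × Int × PySem.Set (Int × Int) →
    Int × Int × Int × Int × PySem.Set (Int × Int)
  | 0, st => st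
  | Nat.succ n, st =>
    let prev := (st.1, st.2.1)
    let hx := st.1 + dx
    let hy := st.2.1 + dy
    if |hx - st.2.2.1| > 1 ∨ |hy - st.2.2.2.1| > 1 then
      bSeg dx dy n (hx, hy, prev.1, prev.2, PySem.Set.add st.2.2.2.2 prev)
    else
      bSeg dx dy n (hx, hy, st.2.2.1, st.2.2.2.1, st.2.2.2.2)

-- B's direction loop; none = ValueError('Invalid direction')
def bGo : List (String × Int) → Int × Int × Int × Int × PySem.Set (Int × Int) →
    Option (PySem.Set (Int × Int))
  | [], st => some st.2.2.2.2
  | (d, dist) :: rest, st =>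
    match PySem.Dict.get? moves d with
    | none => none
    | some dxy => bGo rest (bSeg dxy.1 dxy.2 dist.toNat st)

def calculate_visited_alt (directions : List (String × Int)) : List (Int × Int) :=
  match bGo directions (0, 0, 0, 0, PySem.Set.ofList [((0 : Int), (0 : Int))]) with
  | none => []   -- Python raises ValueError here; excluded by Pre_
  | some v => v

-- ===== PRECONDITION & SPEC =====
-- A raises ValueError on any direction outside R/L/U/D; Pre_ admits exactly the inputs where A returns.
def Pre_calculate_visited (directions : List (String × Int)) : Prop :=
  ∀ p ∈ directions, p.1 = "R" ∨ p.1 = "L" ∨ p.1 = "U" ∨ p.1 = "D"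
instance (directions : List (String × Int)) : Decidable (Pre_calculate_visited directions) := by
  unfold Pre_calculate_visited; infer_instance

def pvWitness_calculate_visited : (List (String × Int)) := [("R", 2), ("U", 1)]

def Spec_calculate_visited (directions : List (String × Int)) (out : List (Int × Int)) : Prop := out = calculate_visited_alt directions
instance (directions : List (String × Int)) (out : List (Int × Int)) : Decidable (Spec_calculate_visited directions out) := by unfold Spec_calculate_visited; infer_instance

-- ===== CLAIM (what is proved, stated in full; the proofs are below) =====
def Claim_equal_calculate_visited : Prop := ∀ (directions : List (String × Int)), Dom_calculate_visited directions → Pre_calculate_visited directions → Spec_calculate_visited directions (calculate_visited directions)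

-- ===== LEMMAS AND PROOFS =====

-- A's per-axis update lands on the head's previous coordinate
lemma coord_eq (t x d : Int) (hinv : |x - t| ≤ 1) (hd1 : -1 ≤ d) (hd2 : d ≤ 1)
    (htr : d = 0 ∨ |x + d - t| > 1) :
    (if t ≠ x + d then t + move_in_direction t (x + d) else t) = x := by
  simp only [move_in_direction]
  rw [abs_le] at hinv
  rcases htr with h | h
  · subst h; split_ifs <;> omega
  · rw [gt_iff_lt, lt_abs] at h
    split_ifs <;> omega

-- under the loop invariant (tail within Chebyshev 1 of the head) and a unit
-- orthogonal head move, A's tail step equals B's teleport-to-previous step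
lemma step_eq (x y tx ty dx dy : Int) (v : PySem.Set (Int × Int))
    (hd : dx = 0 ∨ dy = 0) (hdx1 : -1 ≤ dx) (hdx2 : dx ≤ 1) (hdy1 : -1 ≤ dy) (hdy2 : dy ≤ 1)
    (hix : |x - tx| ≤ 1) (hiy : |y - ty| ≤ 1) :
    tailStep (tx, ty, v) (x + dx, y + dy) =
      (if |x + dx - tx| > 1 ∨ |y + dy - ty| > 1 then (x, y, PySem.Set.add v (x, y))
       else (tx, ty, v)) := by
  by_cases htr : |x + dx - tx| > 1 ∨ |y + dy - ty| > 1
  · rw [if_pos htr]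
    have hAx : ¬ (|tx - (x + dx)| ≤ 1 ∧ |ty - (y + dy)| ≤ 1) := by
      rw [abs_sub_comm tx, abs_sub_comm ty]; omega
    have hx' : (if tx ≠ x + dx then tx + move_in_direction tx (x + dx) else tx) = x := by
      apply coord_eq tx x dx hix hdx1 hdx2
      rcases hd with h0 | h0
      · exact Or.inl h0
      · rcases htr with h | h
        · exact Or.inr h
        · rw [h0, add_zero, gt_iff_lt, lt_abs] at h
          rw [abs_le] at hiy; omega
    have hy' : (if ty ≠ y + dy then ty + move_in_direction ty (y + dy) else ty) = y := by
      apply coord_eq ty y dy hiy hdy1 hdy2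
      rcases hd with h0 | h0
      · rcases htr with h | h
        · rw [h0, add_zero, gt_iff_lt, lt_abs] at h
          rw [abs_le] at hix; omega
        · exact Or.inr h
      · exact Or.inl h0
    simp only [tailStep, if_neg hAx]
    rw [hx', hy']
  · rw [if_neg htr]
    push Not at htr
    have hAx : |tx - (x + dx)| ≤ 1 ∧ |ty - (y + dy)| ≤ 1 := by
      rw [abs_sub_comm tx, abs_sub_comm ty]; exact htr
    simp only [tailStep, if_pos hAx]

-- B's inner loop = A's yielded segment folded through tailStep, with the invariant
lemma seg_equiv (dx dy : Int) (hd : dx = 0 ∨ dy = 0) (hdx1 : -1 ≤ dx) (hdx2 : dx ≤ 1)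
    (hdy1 : -1 ≤ dy) (hdy2 : dy ≤ 1) (n : Nat) :
    ∀ (x y tx ty : Int) (v : PySem.Set (Int × Int)), |x - tx| ≤ 1 → |y - ty| ≤ 1 →
    bSeg dx dy n (x, y, tx, ty, v) =
      ((travSeg dx dy x y n).2.1, (travSeg dx dy x y n).2.2,
       ((travSeg dx dy x y n).1.foldl tailStep (tx, ty, v))) ∧
    |(travSeg dx dy x y n).2.1 - ((travSeg dx dy x y n).1.foldl tailStep (tx, ty, v)).1| ≤ 1 ∧
    |(travSeg dx dy x y n).2.2 - ((travSeg dx dy x y n).1.foldl tailStep (tx, ty, v)).2.1| ≤ 1 := by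
  induction n with
  | zero =>
    intro x y tx ty v hix hiy
    exact ⟨rfl, hix, hiy⟩
  | succ n ih =>
    intro x y tx ty v hix hiy
    simp only [bSeg, travSeg, List.foldl_cons]
    rw [step_eq x y tx ty dx dy v hd hdx1 hdx2 hdy1 hdy2 hix hiy]
    by_cases htr : |x + dx - tx| > 1 ∨ |y + dy - ty| > 1
    · rw [if_pos htr, if_pos htr]
      apply ih
      · rw [show x + dx - x = dx by ring]; exact abs_le.mpr ⟨hdx1, hdx2⟩
      · rw [show y + dy - y = dy by ring]; exact abs_le.mpr ⟨hdy1, hdy2⟩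
    · rw [if_neg htr, if_neg htr]
      push Not at htr
      exact ih _ _ _ _ _ htr.1 htr.2

lemma branch_eq (dx dy : Int) (hd : dx = 0 ∨ dy = 0) (hdx1 : -1 ≤ dx) (hdx2 : dx ≤ 1)
    (hdy1 : -1 ≤ dy) (hdy2 : dy ≤ 1) (x y tx ty : Int) (dist : Nat)
    (v : PySem.Set (Int × Int)) (rest : List (String × Int))
    (hix : |x - tx| ≤ 1) (hiy : |y - ty| ≤ 1)
    (ih : ∀ (x y tx ty : Int) (v : PySem.Set (Int × Int)), |x - tx| ≤ 1 → |y - ty| ≤ 1 →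
      bGo rest (x, y, tx, ty, v) =
        (travGo rest x y).map (fun l => (l.foldl tailStep (tx, ty, v)).2.2)) :
    bGo rest (bSeg dx dy dist (x, y, tx, ty, v)) =
      ((travGo rest (travSeg dx dy x y dist).2.1 (travSeg dx dy x y dist).2.2).map
        (fun l => (travSeg dx dy x y dist).1 ++ l)).map
        (fun l => (l.foldl tailStep (tx, ty, v)).2.2) := by
  obtain ⟨heq, hix', hiy'⟩ := seg_equiv dx dy hd hdx1 hdx2 hdy1 hdy2 dist x y tx ty v hix hiy
  set r := (travSeg dx dy x y dist).1.foldl tailStep (tx, ty, v) with hr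
  rw [heq,
    (show ((travSeg dx dy x y dist).2.1, (travSeg dx dy x y dist).2.2, r)
        = ((travSeg dx dy x y dist).2.1, (travSeg dx dy x y dist).2.2, r.1, r.2.1, r.2.2)
      from rfl),
    ih _ _ _ _ _ hix' hiy']
  cases htr : travGo rest (travSeg dx dy x y dist).2.1 (travSeg dx dy x y dist).2.2 <;>
    simp [List.foldl_append, hr]

lemma go_equiv : ∀ (dirs : List (String × Int)) (x y tx ty : Int)
    (v : PySem.Set (Int × Int)), |x - tx| ≤ 1 → |y - ty| ≤ 1 →
    bGo dirs (x, y, tx, ty, v) =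
      (travGo dirs x y).map (fun l => (l.foldl tailStep (tx, ty, v)).2.2) := by
  intro dirs
  induction dirs with
  | nil => intro x y tx ty v _ _; simp [bGo, travGo]
  | cons p rest ih =>
    obtain ⟨d, dist⟩ := p
    intro x y tx ty v hix hiy
    simp only [bGo, travGo]
    have hget : PySem.Dict.get? moves d =
        (if d = "R" then some ((1 : Int), (0 : Int))
         else if d = "L" then some (-1, 0)
         else if d = "U" then some (0, 1)
         else if d = "D" then some (0, -1) else none) := by
      by_cases h1 : d = "R"
      · subst h1; decide
      · by_cases h2 : d = "L"
        · subst h2; decide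
        · by_cases h3 : d = "U"
          · subst h3; decide
          · by_cases h4 : d = "D"
            · subst h4; decide
            · simp only [if_neg h1, if_neg h2, if_neg h3, if_neg h4]
              rw [PySem.Dict.get?_eq_none_iff_not_mem_keys]
              have hk : moves.keys = ["R", "L", "U", "D"] := by decide
              simp [hk, h1, h2, h3, h4]
    rw [hget]
    split_ifs with h1 h2 h3 h4
    · exact branch_eq 1 0 (Or.inr rfl) (by norm_num) (by norm_num) (by norm_num) (by norm_num)
        x y tx ty dist.toNat v rest hix hiy ih
    · exact branch_eq (-1) 0 (Or.inr rfl) (by norm_num) (by norm_num) (by norm_num) (by norm_num)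
        x y tx ty dist.toNat v rest hix hiy ih
    · exact branch_eq 0 1 (Or.inl rfl) (by norm_num) (by norm_num) (by norm_num) (by norm_num)
        x y tx ty dist.toNat v rest hix hiy ih
    · exact branch_eq 0 (-1) (Or.inl rfl) (by norm_num) (by norm_num) (by norm_num) (by norm_num)
        x y tx ty dist.toNat v rest hix hiy ih
    · rfl

-- ===== VERDICT (by name: the statement is the Claim_ definition above) =====
theorem calculate_visited_spec : Claim_equal_calculate_visited := by
  intro dirs _ _
  unfold Spec_calculate_visited calculate_visited calculate_visited_alt _root_.traverse
  rw [go_equiv dirs 0 0 0 0 _ (by norm_num) (by norm_num)]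
  cases h : travGo dirs 0 0 with
  | none => rfl
  | some l =>
    have h0 : tailStep ((0 : Int), (0 : Int), PySem.Set.ofList [((0 : Int), (0 : Int))]) (0, 0)
        = (0, 0, PySem.Set.ofList [((0 : Int), (0 : Int))]) := by decide
    simp [List.foldl_cons, h0]
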